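-- pv_equiv track=rewrite | github.com/Winmini/CodingTest | 모의고사.py | solution
-- ===== SOURCE A (Python) =====
-- def solution(answers):
--     first = [i%5 + 1 for i in range(10000)]
--     second = [2,1,2,3,2,4,2,5]*1250
--     third = [3,3,1,1,2,2,4,4,5,5]*1000
--     f_sol = 0
--     s_sol = 0
--     t_sol = 0
--     for i in range(len(answers)):
--         if first[i] == answers[i]:
--             f_sol += 1
--         if second[i] == answers[i]:
--             s_sol += 1
--         if third[i] == answers[i]:
--             t_sol += 1
--     answer = sorted([[f_sol, 1], [s_sol, 2], [t_sol, 3]], reverse=True)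
--     if answer[0][0] > answer[1][0]:
--         return [answer[0][1]]
--     elif answer[1][0] > answer[2][0]:
--         return sorted([answer[0][1], answer[1][1]])
--     else:
--         return sorted([answer[0][1], answer[1][1], answer[2][1]])
-- ===== SOURCE B (Python) =====
-- def solution(answers):
--     # Histogram by residue class: 40 = lcm(5, 8, 10), so each pattern is a
--     # function of i % 40.  One pass counts (i % 40, answer) pairs; each
--     # supervisor's score is then 40 table lookups, no per-element comparison.
--     cnt = {}
--     for i, a in enumerate(answers):
--         key = (i % 40, a)
--         cnt[key] = cnt.get(key, 0) + 1
--     patterns = ([1, 2, 3, 4, 5],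
--                 [2, 1, 2, 3, 2, 4, 2, 5],
--                 [3, 3, 1, 1, 2, 2, 4, 4, 5, 5])
--     scores = [sum(cnt.get((r, p[r % len(p)]), 0) for r in range(40))
--               for p in patterns]
--     best = max(scores)
--     return [idx for idx, sc in enumerate(scores, 1) if sc == best]
-- ===== Notes on version B (the rewrite author's own statement) =====
-- stated objective: alternative
-- what changed: B never compares answers to patterns: it builds a histogram of (index % 40, answer) pairs in one pass (40 = lcm of the pattern periods 5,8,10), computes each supervisor's score as 40 dictionary lookups against that histogram, and selects winners with max + enumerate-filter instead of A's three 10000-element pattern lists, per-position triple comparison and reverse sort with a three-way branch.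
import Mathlib
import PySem

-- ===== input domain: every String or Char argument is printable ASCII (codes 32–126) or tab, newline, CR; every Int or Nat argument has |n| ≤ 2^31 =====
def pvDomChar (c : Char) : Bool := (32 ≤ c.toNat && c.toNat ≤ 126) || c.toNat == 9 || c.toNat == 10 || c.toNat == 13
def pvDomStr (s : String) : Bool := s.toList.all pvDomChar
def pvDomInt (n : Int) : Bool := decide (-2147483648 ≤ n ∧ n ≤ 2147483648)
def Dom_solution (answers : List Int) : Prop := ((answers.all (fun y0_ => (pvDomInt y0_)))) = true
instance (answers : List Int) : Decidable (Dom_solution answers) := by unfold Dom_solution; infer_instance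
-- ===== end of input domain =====

-- B scores by a one-pass histogram of (index % 40, answer) pairs (40 = lcm of the pattern
-- periods) queried 40 times per supervisor, instead of A's three 10000-element pattern
-- lists with a per-position triple comparison and a reverse sort + branch (objective: alternative).

-- ===== PORT A =====
def solution (answers : List Int) : List Int :=
  let first := (PySem.List.pyRange 0 10000 1).map (fun i => PySem.Int.mod i 5 + 1)
  let second := PySem.List.pyRepeat [2, 1, 2, 3, 2, 4, 2, 5] 1250
  let third := PySem.List.pyRepeat [3, 3, 1, 1, 2, 2, 4, 4, 5, 5] 1000
  let st := (PySem.List.pyRange 0 (answers.length : Int) 1).foldl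
    (fun (st : Int × Int × Int) i =>
      (if PySem.List.pyGetD first i 0 = PySem.List.pyGetD answers i 0 then st.1 + 1 else st.1,
       if PySem.List.pyGetD second i 0 = PySem.List.pyGetD answers i 0 then st.2.1 + 1 else st.2.1,
       if PySem.List.pyGetD third i 0 = PySem.List.pyGetD answers i 0 then st.2.2 + 1 else st.2.2))
    (0, 0, 0)
  let answer := PySem.List.sorted2 [(st.1, (1 : Int)), (st.2.1, 2), (st.2.2, 3)]
    (fun x => x.1) (fun x => x.2) true
  let a0 := PySem.List.pyGetD answer 0 (0, 0)
  let a1 := PySem.List.pyGetD answer 1 (0, 0)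
  let a2 := PySem.List.pyGetD answer 2 (0, 0)
  if a0.1 > a1.1 then [a0.2]
  else if a1.1 > a2.1 then PySem.List.sorted [a0.2, a1.2] (fun x => x) false
  else PySem.List.sorted [a0.2, a1.2, a2.2] (fun x => x) false

-- ===== PORT B =====
-- the histogram loop: cnt[(i % 40, a)] += 1
def altCnt (answers : List Int) : PySem.Dict (Int × Int) Int :=
  (PySem.List.enumerate answers 0).foldl
    (fun d ia =>
      d.insert (PySem.Int.mod ia.1 40, ia.2)
        (d.getD (PySem.Int.mod ia.1 40, ia.2) 0 + 1))
    PySem.Dict.empty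

-- sum(cnt.get((r, p[r % len(p)]), 0) for r in range(40))
def altScore (cnt : PySem.Dict (Int × Int) Int) (p : List Int) : Int :=
  ((PySem.List.pyRange 0 40 1).map (fun r =>
      cnt.getD (r, PySem.List.pyGetD p (PySem.Int.mod r (p.length : Int)) 0) 0)).sum

def solution_alt (answers : List Int) : List Int :=
  let cnt := altCnt answers
  let patterns : List (List Int) :=
    [[1, 2, 3, 4, 5], [2, 1, 2, 3, 2, 4, 2, 5], [3, 3, 1, 1, 2, 2, 4, 4, 5, 5]]
  let scores := patterns.map (fun p => altScore cnt p)
  match PySem.List.max? scores (fun x => x) with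
  | none => []
  | some best => (PySem.List.enumerate scores 1).filterMap
      (fun q => if q.2 = best then some q.1 else none)

-- ===== PRECONDITION & SPEC =====
-- Pre_ excludes lists longer than 10000: there A raises IndexError (its pattern lists run out).
def Pre_solution (answers : List Int) : Prop := answers.length ≤ 10000
instance (answers : List Int) : Decidable (Pre_solution answers) := by unfold Pre_solution; infer_instance
def pvWitness_solution : List Int := [1, 3, 2, 4, 2]

def Spec_solution (answers : List Int) (out : List Int) : Prop := out = solution_alt answers
instance (answers : List Int) (out : List Int) : Decidable (Spec_solution answers out) := by unfold Spec_solution; infer_instance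

-- ===== CLAIM (what is proved, stated in full; the proofs are below) =====
def Claim_equal_solution : Prop := ∀ (answers : List Int), Dom_solution answers → Pre_solution answers → Spec_solution answers (solution answers)

-- ===== LEMMAS AND PROOFS =====

-- the per-position match count both scoring methods compute
def matchScore (p : List Int) (answers : List Int) : Int :=
  ((PySem.List.enumerate answers 0).map
    (fun ia => if ia.2 = PySem.List.pyGetD p (PySem.Int.mod ia.1 (p.length : Int)) 0 then (1 : Int) else 0)).sum

-- the keyed stream B's histogram counts
def keyed (answers : List Int) : List (Int × Int) :=
  (PySem.List.enumerate answers 0).map (fun ia => (PySem.Int.mod ia.1 40, ia.2))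

lemma altCnt_eq_counter (answers : List Int) :
    altCnt answers = PySem.Dict.counter (keyed answers) := by
  unfold altCnt keyed
  rw [← PySem.Dict.foldl_insert_getD_add_one_eq_counter, List.foldl_map]

lemma keyed_append (ys : List Int) (a : Int) :
    keyed (ys ++ [a]) = keyed ys ++ [(PySem.Int.mod (↑ys.length) 40, a)] := by
  simp [keyed, PySem.List.enumerate_append, PySem.List.enumerate_cons, PySem.List.enumerate_nil]

lemma sum_ite_pair (l : List Int) (hl : l.Nodup) (m a : Int) (g : Int → Int) (hm : m ∈ l) :
    (l.map (fun r => if (m, a) = (r, g r) then (1 : Int) else 0)).sum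
      = if a = g m then 1 else 0 := by
  induction l with
  | nil => cases hm
  | cons x xs ih =>
    simp only [List.nodup_cons] at hl
    simp only [List.map_cons, List.sum_cons]
    rcases List.mem_cons.mp hm with rfl | hmem
    · have hz : ∀ r ∈ xs, (if (m, a) = (r, g r) then (1 : Int) else 0) = 0 := by
        intro r hr
        have : m ≠ r := fun h => hl.1 (h ▸ hr)
        simp [Prod.ext_iff, this]
      have : (xs.map (fun r => if (m, a) = (r, g r) then (1 : Int) else 0)).sum = 0 := by
        apply List.sum_eq_zero; intro y hy
        obtain ⟨r, hr, rfl⟩ := List.mem_map.mp hy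
        exact hz r hr
      rw [this]
      by_cases h : a = g m <;> simp [Prod.ext_iff, h]
    · have hne : m ≠ x := fun h => hl.1 (h ▸ hmem)
      rw [ih hl.2 hmem]
      simp [Prod.ext_iff, hne]

lemma matchScore_append (p : List Int) (ys : List Int) (a : Int) :
    matchScore p (ys ++ [a])
      = matchScore p ys
        + (if a = PySem.List.pyGetD p (PySem.Int.mod (↑ys.length) (p.length : Int)) 0 then 1 else 0) := by
  unfold matchScore
  rw [PySem.List.enumerate_append, PySem.List.enumerate_cons, PySem.List.enumerate_nil,
    List.map_append, List.sum_append]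
  simp

lemma altScore_eq_matchScore (p : List Int) (hp : 0 < p.length) (hdvd : p.length ∣ 40)
    (answers : List Int) :
    altScore (altCnt answers) p = matchScore p answers := by
  rw [altCnt_eq_counter]
  induction answers using List.reverseRecOn with
  | nil =>
    simp [altScore, matchScore, keyed, PySem.List.enumerate_nil, PySem.Dict.counter,
      PySem.Dict.getD, PySem.Dict.get?, PySem.Dict.empty]
  | append_singleton ys a ih =>
    unfold altScore at ih ⊢
    rw [keyed_append]
    have hcnt : ∀ k : Int × Int,
        (PySem.Dict.counter (keyed ys ++ [(PySem.Int.mod (↑ys.length) 40, a)])).getD k 0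
          = (PySem.Dict.counter (keyed ys)).getD k 0
            + (if (PySem.Int.mod (↑ys.length) 40, a) = k then (1 : Int) else 0) := by
      intro k
      rw [PySem.Dict.getD_counter, PySem.Dict.getD_counter, List.count_append]
      push_cast
      congr 1
      by_cases h : (PySem.Int.mod (↑ys.length) 40, a) = k <;> simp [List.count_cons, h]
    simp only [hcnt]
    rw [PySem.List.sum_map_add_int]
    rw [ih]
    have hm40 : PySem.Int.mod (↑ys.length) 40 = ((ys.length % 40 : Nat) : Int) := by
      have h40 : (40 : Int) = ((40 : Nat) : Int) := by norm_num
      rw [h40, PySem.Int.mod_natCast]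
    have hmem : PySem.Int.mod (↑ys.length) 40 ∈ PySem.List.pyRange 0 40 1 := by
      rw [PySem.List.mem_pyRange_one]
      exact ⟨PySem.Int.mod_nonneg _ (by norm_num), PySem.Int.mod_lt _ (by norm_num)⟩
    rw [sum_ite_pair _ (PySem.List.nodup_pyRange_one 0 40) _ a _ hmem]
    have hglue : PySem.List.pyGetD p (PySem.Int.mod (PySem.Int.mod (↑ys.length) 40) (p.length : Int)) 0
        = PySem.List.pyGetD p (PySem.Int.mod (↑ys.length) (p.length : Int)) 0 := by
      rw [hm40, PySem.Int.mod_natCast, PySem.Int.mod_natCast,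
        Nat.mod_mod_of_dvd ys.length hdvd]
    rw [hglue]
    rw [matchScore_append p ys a]

lemma getD_flatten_replicate (pat : List Int) (n i : Nat) (d : Int) (hp : pat ≠ [])
    (hi : i < n * pat.length) :
    ((List.replicate n pat).flatten).getD i d = pat.getD (i % pat.length) d := by
  induction n generalizing i with
  | zero => omega
  | succ n ih =>
    rw [List.replicate_succ, List.flatten_cons]
    by_cases h : i < pat.length
    · rw [List.getD_append _ _ _ _ h, Nat.mod_eq_of_lt h]
    · push_neg at h
      have hs : (n + 1) * pat.length = n * pat.length + pat.length := Nat.succ_mul _ _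
      rw [List.getD_append_right _ _ _ _ h, ih (i - pat.length) (by omega)]
      rw [Nat.mod_eq_sub_mod h]

lemma idx_first (k : Nat) (hk : k < 10000) (d : Int) :
    PySem.List.pyGetD ((PySem.List.pyRange 0 10000 1).map (fun i => PySem.Int.mod i 5 + 1)) (↑k) d
      = ([1, 2, 3, 4, 5] : List Int).getD (k % 5) d := by
  have h10 : (10000 : Int) = ((10000 : Nat) : Int) := by norm_num
  rw [h10, PySem.List.pyGetD_map_pyRange _ 10000 k d hk]
  have h5 : (5 : Int) = ((5 : Nat) : Int) := by norm_num
  rw [h5, PySem.Int.mod_natCast]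
  have hm : k % 5 < 5 := Nat.mod_lt _ (by norm_num)
  set m := k % 5 with hmdef
  interval_cases m <;> simp

lemma idx_second (k : Nat) (hk : k < 10000) (d : Int) :
    PySem.List.pyGetD (PySem.List.pyRepeat [2, 1, 2, 3, 2, 4, 2, 5] 1250) (↑k) d
      = ([2, 1, 2, 3, 2, 4, 2, 5] : List Int).getD (k % 8) d := by
  rw [PySem.List.pyGetD_natCast]
  show ((List.replicate (1250 : Int).toNat [2, 1, 2, 3, 2, 4, 2, 5]).flatten).getD k d = _
  rw [getD_flatten_replicate _ _ _ _ (by simp) (by simpa using hk)]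
  norm_num

lemma idx_third (k : Nat) (hk : k < 10000) (d : Int) :
    PySem.List.pyGetD (PySem.List.pyRepeat [3, 3, 1, 1, 2, 2, 4, 4, 5, 5] 1000) (↑k) d
      = ([3, 3, 1, 1, 2, 2, 4, 4, 5, 5] : List Int).getD (k % 10) d := by
  rw [PySem.List.pyGetD_natCast]
  show ((List.replicate (1000 : Int).toNat [3, 3, 1, 1, 2, 2, 4, 4, 5, 5]).flatten).getD k d = _
  rw [getD_flatten_replicate _ _ _ _ (by simp) (by simpa using hk)]
  norm_num

lemma scores (answers : List Int) (h : answers.length ≤ 10000) :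
    (PySem.List.pyRange 0 (answers.length : Int) 1).foldl
      (fun (st : Int × Int × Int) i =>
        (if PySem.List.pyGetD ((PySem.List.pyRange 0 10000 1).map (fun j => PySem.Int.mod j 5 + 1)) i 0
              = PySem.List.pyGetD answers i 0 then st.1 + 1 else st.1,
         if PySem.List.pyGetD (PySem.List.pyRepeat [2, 1, 2, 3, 2, 4, 2, 5] 1250) i 0
              = PySem.List.pyGetD answers i 0 then st.2.1 + 1 else st.2.1,
         if PySem.List.pyGetD (PySem.List.pyRepeat [3, 3, 1, 1, 2, 2, 4, 4, 5, 5] 1000) i 0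
              = PySem.List.pyGetD answers i 0 then st.2.2 + 1 else st.2.2))
      (0, 0, 0)
    = (matchScore [1, 2, 3, 4, 5] answers,
       matchScore [2, 1, 2, 3, 2, 4, 2, 5] answers,
       matchScore [3, 3, 1, 1, 2, 2, 4, 4, 5, 5] answers) := by
  induction answers using List.reverseRecOn with
  | nil =>
    rw [show PySem.List.pyRange 0 ((([] : List Int)).length : Int) 1 = [] from
      PySem.List.pyRange_one_eq_nil (by norm_num)]
    simp [matchScore, PySem.List.enumerate_nil]
  | append_singleton ys a ih =>
    have hlen : (ys ++ [a]).length = ys.length + 1 := by simp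
    have hy : ys.length ≤ 10000 := by simp at h; omega
    have hylt : ys.length < 10000 := by simp at h; omega
    rw [hlen]
    have hcast : ((ys.length + 1 : Nat) : Int) = (ys.length : Int) + 1 := by push_cast; ring
    rw [hcast, PySem.List.pyRange_one_succ_right (by positivity), List.foldl_append]
    have hcg :
        List.foldl
          (fun (st : Int × Int × Int) i =>
            (if PySem.List.pyGetD ((PySem.List.pyRange 0 10000 1).map (fun j => PySem.Int.mod j 5 + 1)) i 0
                  = PySem.List.pyGetD (ys ++ [a]) i 0 then st.1 + 1 else st.1,
             if PySem.List.pyGetD (PySem.List.pyRepeat [2, 1, 2, 3, 2, 4, 2, 5] 1250) i 0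
                  = PySem.List.pyGetD (ys ++ [a]) i 0 then st.2.1 + 1 else st.2.1,
             if PySem.List.pyGetD (PySem.List.pyRepeat [3, 3, 1, 1, 2, 2, 4, 4, 5, 5] 1000) i 0
                  = PySem.List.pyGetD (ys ++ [a]) i 0 then st.2.2 + 1 else st.2.2))
          ((0 : Int), (0 : Int), (0 : Int)) (PySem.List.pyRange 0 (ys.length : Int) 1)
        = List.foldl
          (fun (st : Int × Int × Int) i =>
            (if PySem.List.pyGetD ((PySem.List.pyRange 0 10000 1).map (fun j => PySem.Int.mod j 5 + 1)) i 0
                  = PySem.List.pyGetD ys i 0 then st.1 + 1 else st.1,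
             if PySem.List.pyGetD (PySem.List.pyRepeat [2, 1, 2, 3, 2, 4, 2, 5] 1250) i 0
                  = PySem.List.pyGetD ys i 0 then st.2.1 + 1 else st.2.1,
             if PySem.List.pyGetD (PySem.List.pyRepeat [3, 3, 1, 1, 2, 2, 4, 4, 5, 5] 1000) i 0
                  = PySem.List.pyGetD ys i 0 then st.2.2 + 1 else st.2.2))
          ((0 : Int), (0 : Int), (0 : Int)) (PySem.List.pyRange 0 (ys.length : Int) 1) := by
      apply PySem.List.foldl_congr_mem
      intro acc x hx
      rw [PySem.List.mem_pyRange_one] at hx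
      obtain ⟨k, rfl⟩ := Int.eq_ofNat_of_zero_le hx.1
      have hk : k < ys.length := by exact_mod_cast hx.2
      have hgy : PySem.List.pyGetD (ys ++ [a]) (↑k) 0 = PySem.List.pyGetD ys (↑k) 0 := by
        rw [PySem.List.pyGetD_natCast, PySem.List.pyGetD_natCast, List.getD_append _ _ _ _ hk]
      rw [hgy]
    rw [hcg]
    rw [ih hy]
    have hgetlast : PySem.List.pyGetD (ys ++ [a]) (↑ys.length) 0 = a := by
      rw [PySem.List.pyGetD_natCast, List.getD_append_right _ _ _ _ (le_refl _)]
      simp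
    simp only [List.foldl_cons, List.foldl_nil]
    rw [idx_first ys.length hylt, idx_second ys.length hylt, idx_third ys.length hylt, hgetlast]
    rw [matchScore_append, matchScore_append, matchScore_append]
    have c5 : PySem.Int.mod (↑ys.length) (([1,2,3,4,5] : List Int).length : Int) = ↑(ys.length % 5) := by
      have : (([1,2,3,4,5] : List Int).length : Int) = ((5 : Nat) : Int) := by simp
      rw [this, PySem.Int.mod_natCast]
    have c8 : PySem.Int.mod (↑ys.length) (([2,1,2,3,2,4,2,5] : List Int).length : Int) = ↑(ys.length % 8) := by
      have : (([2,1,2,3,2,4,2,5] : List Int).length : Int) = ((8 : Nat) : Int) := by simp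
      rw [this, PySem.Int.mod_natCast]
    have c10 : PySem.Int.mod (↑ys.length) (([3,3,1,1,2,2,4,4,5,5] : List Int).length : Int) = ↑(ys.length % 10) := by
      have : (([3,3,1,1,2,2,4,4,5,5] : List Int).length : Int) = ((10 : Nat) : Int) := by simp
      rw [this, PySem.Int.mod_natCast]
    rw [c5, c8, c10, PySem.List.pyGetD_natCast, PySem.List.pyGetD_natCast, PySem.List.pyGetD_natCast]
    simp only [Prod.mk.injEq]
    refine ⟨?_, ?_, ?_⟩ <;> split_ifs <;> omega

def Asel (f s t : Int) : List Int :=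
  let answer := PySem.List.sorted2 [(f, (1 : Int)), (s, 2), (t, 3)] (fun x => x.1) (fun x => x.2) true
  let a0 := PySem.List.pyGetD answer 0 (0, 0)
  let a1 := PySem.List.pyGetD answer 1 (0, 0)
  let a2 := PySem.List.pyGetD answer 2 (0, 0)
  if a0.1 > a1.1 then [a0.2]
  else if a1.1 > a2.1 then PySem.List.sorted [a0.2, a1.2] (fun x => x) false
  else PySem.List.sorted [a0.2, a1.2, a2.2] (fun x => x) false

def Bsel (f s t : Int) : List Int :=
  match PySem.List.max? [f, s, t] (fun x => x) with
  | none => []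
  | some best => (PySem.List.enumerate [f, s, t] 1).filterMap
      (fun p => if p.2 = best then some p.1 else none)

set_option maxHeartbeats 1000000 in
lemma sel (f s t : Int) : Asel f s t = Bsel f s t := by
  unfold Asel Bsel
  rcases lt_trichotomy f s with h1 | rfl | h1
  · rcases lt_trichotomy s t with h3 | rfl | h3
    · have h2 := h1.trans h3
      simp [PySem.List.sorted2, PySem.List.insertBy, PySem.List.sorted, PySem.List.pyGetD,
        PySem.List.max?, PySem.List.enumerate, h1, h2, h3, h1.ne, h1.ne', h2.ne, h2.ne',
        h3.ne, h3.ne', lt_asymm h1, lt_asymm h2, lt_asymm h3]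
    · simp [PySem.List.sorted2, PySem.List.insertBy, PySem.List.sorted, PySem.List.pyGetD,
        PySem.List.max?, PySem.List.enumerate, h1, h1.ne, h1.ne', lt_asymm h1, lt_irrefl]
    · rcases lt_trichotomy f t with h2 | rfl | h2
      · simp [PySem.List.sorted2, PySem.List.insertBy, PySem.List.sorted, PySem.List.pyGetD,
          PySem.List.max?, PySem.List.enumerate, h1, h2, h3, h1.ne, h1.ne', h2.ne, h2.ne',
          h3.ne, h3.ne', lt_asymm h1, lt_asymm h2, lt_asymm h3]
      · simp [PySem.List.sorted2, PySem.List.insertBy, PySem.List.sorted, PySem.List.pyGetD,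
          PySem.List.max?, PySem.List.enumerate, h1, h3, h1.ne, h1.ne', h3.ne, h3.ne',
          lt_asymm h1, lt_asymm h3, lt_irrefl]
      · simp [PySem.List.sorted2, PySem.List.insertBy, PySem.List.sorted, PySem.List.pyGetD,
          PySem.List.max?, PySem.List.enumerate, h1, h2, h3, h1.ne, h1.ne', h2.ne, h2.ne',
          h3.ne, h3.ne', lt_asymm h1, lt_asymm h2, lt_asymm h3]
  · rcases lt_trichotomy f t with h2 | rfl | h2
    · simp [PySem.List.sorted2, PySem.List.insertBy, PySem.List.sorted, PySem.List.pyGetD,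
        PySem.List.max?, PySem.List.enumerate, h2, h2.ne, h2.ne', lt_asymm h2, lt_irrefl]
    · simp [PySem.List.sorted2, PySem.List.insertBy, PySem.List.sorted, PySem.List.pyGetD,
        PySem.List.max?, PySem.List.enumerate, lt_irrefl]
    · simp [PySem.List.sorted2, PySem.List.insertBy, PySem.List.sorted, PySem.List.pyGetD,
        PySem.List.max?, PySem.List.enumerate, h2, h2.ne, h2.ne', lt_asymm h2, lt_irrefl]
  · rcases lt_trichotomy f t with h2 | rfl | h2
    · have h3 := h1.trans h2
      simp [PySem.List.sorted2, PySem.List.insertBy, PySem.List.sorted, PySem.List.pyGetD,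
        PySem.List.max?, PySem.List.enumerate, h1, h2, h3, h1.ne, h1.ne', h2.ne, h2.ne',
        h3.ne, h3.ne', lt_asymm h1, lt_asymm h2, lt_asymm h3]
    · simp [PySem.List.sorted2, PySem.List.insertBy, PySem.List.sorted, PySem.List.pyGetD,
        PySem.List.max?, PySem.List.enumerate, h1, h1.ne, h1.ne', lt_asymm h1, lt_irrefl]
    · rcases lt_trichotomy s t with h3 | rfl | h3
      · simp [PySem.List.sorted2, PySem.List.insertBy, PySem.List.sorted, PySem.List.pyGetD,
          PySem.List.max?, PySem.List.enumerate, h1, h2, h3, h1.ne, h1.ne', h2.ne, h2.ne',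
          h3.ne, h3.ne', lt_asymm h1, lt_asymm h2, lt_asymm h3]
      · simp [PySem.List.sorted2, PySem.List.insertBy, PySem.List.sorted, PySem.List.pyGetD,
          PySem.List.max?, PySem.List.enumerate, h1, h1.ne, h1.ne', lt_asymm h1, lt_irrefl]
      · simp [PySem.List.sorted2, PySem.List.insertBy, PySem.List.sorted, PySem.List.pyGetD,
          PySem.List.max?, PySem.List.enumerate, h1, h2, h3, h1.ne, h1.ne', h2.ne, h2.ne',
          h3.ne, h3.ne', lt_asymm h1, lt_asymm h2, lt_asymm h3]

theorem solution_eq_Asel (answers : List Int) (h : answers.length ≤ 10000) :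
    solution answers
      = Asel (matchScore [1, 2, 3, 4, 5] answers)
          (matchScore [2, 1, 2, 3, 2, 4, 2, 5] answers)
          (matchScore [3, 3, 1, 1, 2, 2, 4, 4, 5, 5] answers) := by
  unfold solution Asel
  simp only [scores answers h]

theorem solution_alt_eq_Bsel (answers : List Int) :
    solution_alt answers
      = Bsel (matchScore [1, 2, 3, 4, 5] answers)
          (matchScore [2, 1, 2, 3, 2, 4, 2, 5] answers)
          (matchScore [3, 3, 1, 1, 2, 2, 4, 4, 5, 5] answers) := by
  unfold solution_alt Bsel
  simp only [List.map]
  rw [altScore_eq_matchScore _ (by norm_num) (by norm_num) answers,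
    altScore_eq_matchScore _ (by norm_num) (by norm_num) answers,
    altScore_eq_matchScore _ (by norm_num) (by norm_num) answers]

-- ===== VERDICT (by name: the statement is the Claim_ definition above) =====
theorem solution_spec : Claim_equal_solution := by
  intro answers _ hpre
  unfold Spec_solution
  rw [solution_eq_Asel answers hpre, solution_alt_eq_Bsel answers, sel]
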